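-- pv_equiv track=rewrite | github.com/HadrielTzuk/tip-marketplace | Integrations/ActiveDirectory/Managers/utils.py | get_existing_fields_to_enrich
-- ===== SOURCE A (Python) =====
-- def get_existing_fields_to_enrich(fields_to_enrich, existing_fields):
--     """
--     Get fields to enrich the entity according to a provided list of fields
--     :param fields_to_enrich: {list} The provided list of fields.
--     :param existing_fields: {list} existing model fields.
--     :return {({str}, {str})} Set of field to enrich the entity with, Set of existing attributes
--     """
--     existing_fields_to_enrich = set()
--     existing_attributes = set()
--
--     for field in fields_to_enrich:
--         for existing_field in existing_fields:
--             existing_field_splitted = existing_field.split("_")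
--             if field in existing_field_splitted:
--                 existing_fields_to_enrich.add(existing_field)
--                 existing_attributes.add(field)
--
--     return existing_fields_to_enrich, existing_attributes
-- ===== SOURCE B (Python) =====
-- def get_existing_fields_to_enrich(fields_to_enrich, existing_fields):
--     """Index existing fields by their underscore-tokens once, then answer each
--     requested field with one dictionary lookup."""
--     index = {}
--     for existing_field in existing_fields:
--         for token in existing_field.split("_"):
--             index.setdefault(token, []).append(existing_field)
--
--     existing_fields_to_enrich = set()
--     existing_attributes = set()
--     for field in fields_to_enrich:
--         bucket = index.get(field)
--         if bucket:
--             existing_fields_to_enrich.update(bucket)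
--             existing_attributes.add(field)
--
--     return existing_fields_to_enrich, existing_attributes
-- ===== Notes on version B (the rewrite author's own statement) =====
-- stated objective: faster
-- what changed: B precomputes a token->existing_fields index (one pass over existing_fields and their underscore tokens), then answers each requested field with one dictionary lookup, replacing A's rescan of all existing fields (with re-splitting) per requested field.
import Mathlib
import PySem

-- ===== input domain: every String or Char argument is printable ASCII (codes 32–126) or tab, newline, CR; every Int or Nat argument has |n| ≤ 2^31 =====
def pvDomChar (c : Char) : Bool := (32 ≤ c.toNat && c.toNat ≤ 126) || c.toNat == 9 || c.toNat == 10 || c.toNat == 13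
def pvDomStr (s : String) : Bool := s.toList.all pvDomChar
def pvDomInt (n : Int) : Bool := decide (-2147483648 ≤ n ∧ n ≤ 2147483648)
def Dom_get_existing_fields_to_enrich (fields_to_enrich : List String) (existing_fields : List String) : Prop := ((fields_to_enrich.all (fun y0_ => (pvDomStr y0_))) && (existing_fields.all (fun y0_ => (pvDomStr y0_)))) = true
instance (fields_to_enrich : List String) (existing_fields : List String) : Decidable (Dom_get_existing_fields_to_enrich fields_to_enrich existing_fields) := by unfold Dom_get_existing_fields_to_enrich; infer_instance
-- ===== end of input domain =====

-- B replaces A's per-field rescan of existing_fields (re-splitting every field each time)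
-- by a token→existing_fields index built once, then one lookup per requested field (faster).

-- exact port of s.split("_") (nonempty separator) via PySem.Chars.splitOn
def pySplitUnderscore (s : String) : List String :=
  (PySem.Chars.splitOn s.toList ['_']).map (fun cs => String.ofList cs)

-- ===== PORT A =====
def get_existing_fields_to_enrich (fields_to_enrich : List String) (existing_fields : List String) : List String × List String :=
  fields_to_enrich.foldl
    (fun s field =>
      existing_fields.foldl
        (fun s existing_field =>
          let existing_field_splitted := pySplitUnderscore existing_field
          if field ∈ existing_field_splitted then
            (PySem.Set.add s.1 existing_field, PySem.Set.add s.2 field)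
          else s)
        s)
    (PySem.Set.empty, PySem.Set.empty)

-- ===== PORT B =====
-- index.setdefault(token, []).append(existing_field)  ==  index[token] = index.get(token, []) + [existing_field]
def pvBuildIndex (existing_fields : List String) : PySem.Dict String (List String) :=
  existing_fields.foldl
    (fun index existing_field =>
      (pySplitUnderscore existing_field).foldl
        (fun index token => index.modify token [] (fun v => v ++ [existing_field]))
        index)
    PySem.Dict.empty

def get_existing_fields_to_enrich_alt (fields_to_enrich : List String) (existing_fields : List String) : List String × List String :=
  let index := pvBuildIndex existing_fields
  fields_to_enrich.foldl
    (fun s field =>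
      let bucket := index.getD field []   -- index.get(field): None and a missing key are both falsy
      if bucket ≠ [] then
        (PySem.Set.update s.1 bucket, PySem.Set.add s.2 field)
      else s)
    (PySem.Set.empty, PySem.Set.empty)

-- ===== PRECONDITION & SPEC =====
def Spec_get_existing_fields_to_enrich (fields_to_enrich : List String) (existing_fields : List String) (out : List String × List String) : Prop := out = get_existing_fields_to_enrich_alt fields_to_enrich existing_fields
instance (fields_to_enrich : List String) (existing_fields : List String) (out : List String × List String) : Decidable (Spec_get_existing_fields_to_enrich fields_to_enrich existing_fields out) := by unfold Spec_get_existing_fields_to_enrich; infer_instance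

-- ===== CLAIM (what is proved, stated in full; the proofs are below) =====
def Claim_equal_get_existing_fields_to_enrich : Prop := ∀ (fields_to_enrich : List String) (existing_fields : List String), Dom_get_existing_fields_to_enrich fields_to_enrich existing_fields → Spec_get_existing_fields_to_enrich fields_to_enrich existing_fields (get_existing_fields_to_enrich fields_to_enrich existing_fields)

-- ===== LEMMAS AND PROOFS =====

-- the bucket a field f ends up with: each existing field, once per occurrence of f among its tokens
def pvRep (f : String) (E : List String) : List String :=
  E.flatMap (fun ef => ((pySplitUnderscore ef).filter (fun t => t == f)).map (fun _ => ef))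

theorem pvBuildIndex_inner_getD (f ef : String) (toks : List String)
    (d : PySem.Dict String (List String)) :
    (toks.foldl (fun index token => index.modify token [] (fun v => v ++ [ef])) d).getD f []
      = d.getD f [] ++ (toks.filter (fun t => t == f)).map (fun _ => ef) := by
  induction toks generalizing d with
  | nil => simp
  | cons t rest ih =>
    simp only [List.foldl_cons, ih, List.filter_cons]
    rw [PySem.Dict.getD_modify]
    by_cases h : f = t
    · subst h; simp
    · simp [h, show ¬ t = f from fun hh => h hh.symm]

theorem pvBuildIndex_getD (f : String) (E : List String) :
    (pvBuildIndex E).getD f [] = pvRep f E := by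
  unfold pvBuildIndex
  suffices h : ∀ d : PySem.Dict String (List String),
      (E.foldl (fun index existing_field =>
        (pySplitUnderscore existing_field).foldl
          (fun index token => index.modify token [] (fun v => v ++ [existing_field])) index) d).getD f []
        = d.getD f [] ++ pvRep f E by
    simpa using h PySem.Dict.empty
  induction E with
  | nil => intro d; simp [pvRep]
  | cons ef rest ih =>
    intro d
    simp only [List.foldl_cons, ih, pvBuildIndex_inner_getD, pvRep, List.flatMap_cons,
      List.append_assoc]

theorem pvAdd_map_const {s : PySem.Set String} {a : String} (l : List String) :
    List.foldl PySem.Set.add s (l.map (fun _ => a))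
      = if l = [] then s else PySem.Set.add s a := by
  induction l generalizing s with
  | nil => simp
  | cons x rest ih =>
    simp only [List.map_cons, List.foldl_cons, ih]
    by_cases h : rest = []
    · simp [h]
    · simp [h]

theorem pvAloop (f : String) (E : List String) (s1 s2 : PySem.Set String) :
    E.foldl
      (fun s existing_field =>
        let existing_field_splitted := pySplitUnderscore existing_field
        if f ∈ existing_field_splitted then
          (PySem.Set.add s.1 existing_field, PySem.Set.add s.2 f)
        else s)
      (s1, s2)
      = (List.foldl PySem.Set.add s1 (pvRep f E),
         if pvRep f E = [] then s2 else PySem.Set.add s2 f) := by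
  induction E generalizing s1 s2 with
  | nil => simp [pvRep]
  | cons ef rest ih =>
    have hrep : pvRep f (ef :: rest)
        = ((pySplitUnderscore ef).filter (fun t => t == f)).map (fun _ => ef) ++ pvRep f rest := by
      simp [pvRep]
    by_cases h : f ∈ pySplitUnderscore ef
    · have hfil : (pySplitUnderscore ef).filter (fun t => t == f) ≠ [] := by
        intro hnil
        have : f ∈ (pySplitUnderscore ef).filter (fun t => t == f) := by
          simp [List.mem_filter, h]
        simp [hnil] at this
      simp only [List.foldl_cons, if_pos h, ih]
      rw [hrep, List.foldl_append, pvAdd_map_const]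
      have hmapne : ((pySplitUnderscore ef).filter (fun t => t == f)).map (fun _ => ef) ++ pvRep f rest ≠ [] := by
        simp [hfil]
      rw [if_neg hmapne]
      have hne : (pySplitUnderscore ef).filter (fun t => t == f) ≠ [] := hfil
      rw [if_neg hne]
      by_cases hr : pvRep f rest = []
      · simp [hr]
      · simp [hr]
    · have hfil : (pySplitUnderscore ef).filter (fun t => t == f) = [] := by
        rw [List.filter_eq_nil_iff]
        intro t ht hbeq
        exact h (by rwa [eq_of_beq hbeq] at ht)
      simp only [List.foldl_cons, if_neg h, ih, hrep, hfil, List.map_nil, List.nil_append]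

-- ===== VERDICT (by name: the statement is the Claim_ definition above) =====
theorem get_existing_fields_to_enrich_spec : Claim_equal_get_existing_fields_to_enrich := by
  intro F E _
  simp only [Spec_get_existing_fields_to_enrich, get_existing_fields_to_enrich,
    get_existing_fields_to_enrich_alt]
  apply PySem.List.foldl_congr_mem
  intro s f _
  obtain ⟨s1, s2⟩ := s
  rw [pvAloop, pvBuildIndex_getD]
  by_cases h : pvRep f E = []
  · simp [h]
  · simp [h, PySem.Set.update]
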